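-- pv_equiv track=rewrite | github.com/aws-samples/sample-data-replication-with-aws-glue | src/glue_job/storage/manual_bookmark_config.py | _select_best_primary_key_column
-- ===== SOURCE A (Python) =====
-- from typing import Dict, Optional, Tuple, Any, List
--
-- def _select_best_primary_key_column(pk_columns: List[str]) -> str:
--     """
--     Select the best primary key column from candidates.
--
--     Args:
--         pk_columns: List of primary key column candidates
--
--     Returns:
--         Best primary key column name
--     """
--     if not pk_columns:
--         return None
--
--     # Preference order for primary key columns
--     preferred_patterns = ['id', 'pk', 'primary_key', 'key']
--
--     # Look for exact matches first
--     for pattern in preferred_patterns: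
--         for column in pk_columns:
--             if column == pattern:
--                 return column
--
--     # Then look for columns ending with the pattern
--     for pattern in preferred_patterns:
--         for column in pk_columns:
--             if column.endswith('_' + pattern):
--                 return column
--
--     # If no preferred pattern found, return the first one
--     return pk_columns[0]
-- ===== SOURCE B (Python) =====
-- _PATTERNS = ['id', 'pk', 'primary_key', 'key']
--
--
-- def _rank(column):
--     for i, p in enumerate(_PATTERNS):
--         if column == p:
--             return i
--     for i, p in enumerate(_PATTERNS):
--         if column.endswith('_' + p):
--             return 4 + i
--     return 8
--
--
-- def _select_best_primary_key_column(pk_columns):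
--     if not pk_columns:
--         return None
--     return min(pk_columns, key=_rank)
-- ===== Notes on version B (the rewrite author's own statement) =====
-- stated objective: simpler
-- what changed: Replaces the up-to-eight pattern-major scans over the column list by a single keyed pass: a rank() function maps each column to its preference index (exact match 0-3, suffix match 4-7, else 8) and min(pk_columns, key=rank) picks the first column of minimal rank, first-on-ties giving the positional fallback.
import Mathlib
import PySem

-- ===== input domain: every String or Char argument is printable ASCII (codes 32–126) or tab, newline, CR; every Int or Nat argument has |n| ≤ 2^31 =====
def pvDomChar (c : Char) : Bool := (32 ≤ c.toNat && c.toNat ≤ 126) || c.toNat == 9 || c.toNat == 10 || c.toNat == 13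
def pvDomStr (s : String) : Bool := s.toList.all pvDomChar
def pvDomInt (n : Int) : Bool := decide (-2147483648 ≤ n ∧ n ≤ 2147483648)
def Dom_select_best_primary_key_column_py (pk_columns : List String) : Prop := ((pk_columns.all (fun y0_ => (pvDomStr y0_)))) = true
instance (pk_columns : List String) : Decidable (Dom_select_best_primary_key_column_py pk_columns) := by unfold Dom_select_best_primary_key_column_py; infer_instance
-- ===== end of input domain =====

-- B replaces A's up-to-eight pattern-major scans by one pass keyed by a rank function (min with first-on-ties); same result, simpler.

-- ===== PORT A =====
def pvPatterns : List String := ["id", "pk", "primary_key", "key"]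

-- 'for pattern …: for column …: if column == pattern: return column'
def pvFindExact : List String → List String → Option String
  | [], _ => none
  | p :: ps, cols =>
    match cols.find? (fun c => c == p) with
    | some c => some c
    | none => pvFindExact ps cols

-- 'for pattern …: for column …: if column.endswith("_" + pattern): return column'
def pvFindSuffix : List String → List String → Option String
  | [], _ => none
  | p :: ps, cols =>
    match cols.find? (fun c => PySem.Str.endswith c ("_" ++ p)) with
    | some c => some c
    | none => pvFindSuffix ps cols

def select_best_primary_key_column_py (pk_columns : List String) : Option String :=
  if pk_columns = [] then none
  else
    match pvFindExact pvPatterns pk_columns with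
    | some c => some c
    | none =>
      match pvFindSuffix pvPatterns pk_columns with
      | some c => some c
      | none => PySem.List.pyGet? pk_columns 0

-- ===== PORT B =====
def pvRankE : List (Int × String) → String → Option Nat
  | [], _ => none
  | (i, p) :: rest, c => if c == p then some i.toNat else pvRankE rest c

def pvRankS : List (Int × String) → String → Option Nat
  | [], _ => none
  | (i, p) :: rest, c =>
    if PySem.Str.endswith c ("_" ++ p) then some (4 + i.toNat) else pvRankS rest c

def pvRank (c : String) : Nat :=
  match pvRankE (PySem.List.enumerate pvPatterns) c with
  | some r => r
  | none =>
    match pvRankS (PySem.List.enumerate pvPatterns) c with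
    | some r => r
    | none => 8

-- min(pk_columns, key=_rank): first element of minimal key
def pvMinLoop : String → List String → String
  | best, [] => best
  | best, c :: cs => if pvRank c < pvRank best then pvMinLoop c cs else pvMinLoop best cs

def select_best_primary_key_column_py_alt (pk_columns : List String) : Option String :=
  match pk_columns with
  | [] => none
  | c :: cs => some (pvMinLoop c cs)

-- ===== PRECONDITION & SPEC =====
def Spec_select_best_primary_key_column_py (pk_columns : List String) (out : Option String) : Prop := out = select_best_primary_key_column_py_alt pk_columns
instance (pk_columns : List String) (out : Option String) : Decidable (Spec_select_best_primary_key_column_py pk_columns out) := by unfold Spec_select_best_primary_key_column_py; infer_instance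

-- ===== CLAIM (what is proved, stated in full; the proofs are below) =====
def Claim_equal_select_best_primary_key_column_py : Prop := ∀ (pk_columns : List String), Dom_select_best_primary_key_column_py pk_columns → Spec_select_best_primary_key_column_py pk_columns (select_best_primary_key_column_py pk_columns)

-- ===== LEMMAS AND PROOFS =====

-- Generic infrastructure: tests, first-passing-test index, first-argmin loop.
def pvTests : List (String → Bool) :=
  pvPatterns.map (fun p c => c == p) ++ pvPatterns.map (fun p c => PySem.Str.endswith c ("_" ++ p))

def pvK : List (String → Bool) → String → Nat
  | [], _ => 0
  | t :: ts, c => if t c then 0 else pvK ts c + 1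

def pvLoopT : List (String → Bool) → List String → Option String
  | [], _ => none
  | t :: ts, cols =>
    match cols.find? t with
    | some c => some c
    | none => pvLoopT ts cols

def pvM (k : String → Nat) : String → List String → String
  | best, [] => best
  | best, c :: cs => if k c < k best then pvM k c cs else pvM k best cs

theorem pvM_mem (k : String → Nat) : ∀ (cs : List String) (best : String),
    pvM k best cs ∈ best :: cs := by
  intro cs
  induction cs with
  | nil => intro best; simp [pvM]
  | cons c cs ih =>
    intro best
    simp only [pvM]
    split
    · have := ih c; simp at this ⊢; tauto
    · have := ih best; simp at this ⊢; tauto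

theorem pvM_le (k : String → Nat) : ∀ (cs : List String) (best : String),
    ∀ x ∈ best :: cs, k (pvM k best cs) ≤ k x := by
  intro cs
  induction cs with
  | nil => intro best x hx; simp at hx; simp [pvM, hx]
  | cons c cs ih =>
    intro best x hx
    simp only [pvM]
    simp only [List.mem_cons] at hx
    split
    · rename_i h
      have hc := ih c c (by simp)
      rcases hx with h1 | h1 | h1
      · rw [h1]; omega
      · rw [h1]; exact hc
      · exact ih c x (by simp [h1])
    · rename_i h
      have hbest := ih best best (by simp)
      rcases hx with h1 | h1 | h1
      · rw [h1]; exact hbest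
      · rw [h1]; omega
      · exact ih best x (by simp [h1])

theorem pvM_congr_mem (k k' : String → Nat) : ∀ (cs : List String) (best : String),
    (∀ x ∈ best :: cs, k x = k' x) → pvM k best cs = pvM k' best cs := by
  intro cs
  induction cs with
  | nil => intro best _; simp [pvM]
  | cons c cs ih =>
    intro best h
    have hb := h best (by simp)
    have hc := h c (by simp)
    simp only [pvM, hb, hc]
    split
    · exact ih c (fun x hx => h x (by simp at hx ⊢; tauto))
    · exact ih best (fun x hx => h x (by simp at hx ⊢; tauto))

theorem pvM_succ (k : String → Nat) : ∀ (cs : List String) (best : String),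
    pvM (fun x => k x + 1) best cs = pvM k best cs := by
  intro cs
  induction cs with
  | nil => intro best; simp [pvM]
  | cons c cs ih =>
    intro best
    simp only [pvM, Nat.add_lt_add_iff_right]
    split <;> exact ih _

theorem pvM_const (n : Nat) (k : String → Nat) : ∀ (cs : List String) (best : String),
    (∀ x ∈ best :: cs, k x = n) → pvM k best cs = best := by
  intro cs
  induction cs with
  | nil => intro best _; simp [pvM]
  | cons c cs ih =>
    intro best h
    have hb := h best (by simp)
    have hc := h c (by simp)
    simp only [pvM, hb, hc, lt_irrefl, if_false]
    exact ih best (fun x hx => h x (by simp at hx ⊢; tauto))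

theorem pvM_zero (k : String → Nat) : ∀ (cs : List String) (best : String),
    k best = 0 → pvM k best cs = best := by
  intro cs
  induction cs with
  | nil => intro best _; rfl
  | cons c cs ih =>
    intro best hb
    simp only [pvM]
    rw [if_neg (by omega)]
    exact ih best hb

theorem pvM_find_zero (k : String → Nat) : ∀ (cs : List String) (best c' : String),
    (best :: cs).find? (fun x => k x == 0) = some c' → pvM k best cs = c' := by
  intro cs
  induction cs with
  | nil =>
    intro best c' h
    by_cases hb : k best = 0
    · rw [List.find?_cons_of_pos (by simp [hb])] at h
      simpa [pvM] using h
    · rw [List.find?_cons_of_neg (by simp [hb])] at h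
      simp [List.find?] at h
  | cons c cs ih =>
    intro best c' h
    by_cases hb : k best = 0
    · rw [List.find?_cons_of_pos (by simp [hb])] at h
      injection h with h; subst h
      exact pvM_zero k (c :: cs) best hb
    · rw [List.find?_cons_of_neg (by simp [hb])] at h
      simp only [pvM]
      by_cases hlt : k c < k best
      · rw [if_pos hlt]; exact ih c c' h
      · rw [if_neg hlt]
        have hc : k c ≠ 0 := fun h0 => hlt (by omega)
        rw [List.find?_cons_of_neg (by simp [hc])] at h
        exact ih best c' (by rw [List.find?_cons_of_neg (by simp [hb])]; exact h)

theorem pvK_le : ∀ (ts : List (String → Bool)) (c : String), pvK ts c ≤ ts.length := by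
  intro ts
  induction ts with
  | nil => intro c; simp [pvK]
  | cons t ts ih =>
    intro c
    simp only [pvK, List.length_cons]
    split
    · omega
    · have := ih c; omega

theorem find?_congr_mem {α : Type} (p q : α → Bool) : ∀ (l : List α),
    (∀ x ∈ l, p x = q x) → l.find? p = l.find? q := by
  intro l
  induction l with
  | nil => intro _; rfl
  | cons a l ih =>
    intro h
    have ha := h a (by simp)
    simp only [List.find?, ha]
    split
    · rfl
    · exact ih (fun x hx => h x (by simp [hx]))

theorem pvLoopT_spec : ∀ (ts : List (String → Bool)) (best : String) (cs : List String),
    pvLoopT ts (best :: cs) =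
      if pvK ts (pvM (pvK ts) best cs) < ts.length then some (pvM (pvK ts) best cs) else none := by
  intro ts
  induction ts with
  | nil =>
    intro best cs
    simp [pvLoopT, pvK]
  | cons t ts ih =>
    intro best cs
    have hKc : ∀ x, pvK (t :: ts) x = if t x then 0 else pvK ts x + 1 := fun x => rfl
    cases hf : (best :: cs).find? t with
    | some c' =>
      have hz : (best :: cs).find? (fun x => pvK (t :: ts) x == 0) = some c' := by
        rw [find?_congr_mem _ t]
        · exact hf
        · intro x _
          rw [hKc x]
          cases t x <;> simp
      have hM : pvM (pvK (t :: ts)) best cs = c' := pvM_find_zero _ cs best c' hz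
      have hc0 : pvK (t :: ts) c' = 0 := by
        have := List.find?_some hz
        simpa using this
      simp only [pvLoopT, hf, hM, hc0, List.length_cons]
      rw [if_pos (by omega)]
    | none =>
      have hnone : ∀ x ∈ best :: cs, ¬ t x = true := List.find?_eq_none.mp hf
      have hcong : ∀ x ∈ best :: cs, pvK (t :: ts) x = pvK ts x + 1 := by
        intro x hx; rw [hKc x, if_neg (hnone x hx)]
      have hM : pvM (pvK (t :: ts)) best cs = pvM (pvK ts) best cs := by
        rw [pvM_congr_mem _ (fun x => pvK ts x + 1) cs best]
        · exact pvM_succ _ cs best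
        · intro x hx; exact hcong x hx
      have hmem := pvM_mem (pvK ts) cs best
      have hKm : pvK (t :: ts) (pvM (pvK ts) best cs) = pvK ts (pvM (pvK ts) best cs) + 1 :=
        hcong _ hmem
      simp only [pvLoopT, hf, ih best cs, hM, hKm, List.length_cons]
      by_cases hlt : pvK ts (pvM (pvK ts) best cs) < ts.length
      · rw [if_pos hlt, if_pos (by omega)]
      · rw [if_neg hlt, if_neg (by omega)]

-- Bridges to the concrete ports
theorem pvFindExact_eq : ∀ (ps : List String) (cols : List String),
    pvFindExact ps cols = pvLoopT (ps.map (fun p c => c == p)) cols := by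
  intro ps
  induction ps with
  | nil => intro cols; rfl
  | cons p ps ih =>
    intro cols
    simp only [pvFindExact, List.map_cons, pvLoopT]
    split <;> simp_all

theorem pvFindSuffix_eq : ∀ (ps : List String) (cols : List String),
    pvFindSuffix ps cols = pvLoopT (ps.map (fun p c => PySem.Str.endswith c ("_" ++ p))) cols := by
  intro ps
  induction ps with
  | nil => intro cols; rfl
  | cons p ps ih =>
    intro cols
    simp only [pvFindSuffix, List.map_cons, pvLoopT]
    split <;> simp_all

theorem pvLoopT_append (ts1 ts2 : List (String → Bool)) (cols : List String) :
    pvLoopT (ts1 ++ ts2) cols =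
      match pvLoopT ts1 cols with
      | some c => some c
      | none => pvLoopT ts2 cols := by
  induction ts1 with
  | nil => rfl
  | cons t ts ih =>
    simp only [List.cons_append, pvLoopT]
    split <;> simp_all

theorem pvRank_eq (c : String) : pvRank c = pvK pvTests c := by
  simp only [pvRank, pvRankE, pvRankS, pvTests, pvPatterns, pvPatterns, pvK,
    PySem.List.enumerate, List.map_cons, List.map_nil, List.cons_append, List.nil_append]
  split_ifs <;> simp_all

theorem pvMinLoop_eq : ∀ (cs : List String) (best : String),
    pvMinLoop best cs = pvM (pvK pvTests) best cs := by
  intro cs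
  induction cs with
  | nil => intro best; rfl
  | cons c cs ih =>
    intro best
    simp only [pvMinLoop, pvM, pvRank_eq]
    split <;> exact ih _

-- ===== VERDICT (by name: the statement is the Claim_ definition above) =====
theorem select_best_primary_key_column_py_spec : Claim_equal_select_best_primary_key_column_py := by
  intro pk_columns _
  unfold Spec_select_best_primary_key_column_py
  cases pk_columns with
  | nil => rfl
  | cons c0 cs =>
    have hA : select_best_primary_key_column_py (c0 :: cs) =
        match pvLoopT pvTests (c0 :: cs) with
        | some c => some c
        | none => some c0 := by
      simp only [select_best_primary_key_column_py, if_neg (List.cons_ne_nil c0 cs),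
        pvFindExact_eq, pvFindSuffix_eq, pvTests, pvLoopT_append]
      cases pvLoopT (pvPatterns.map (fun p c => c == p)) (c0 :: cs) with
      | some c => rfl
      | none =>
        cases pvLoopT (pvPatterns.map (fun p c => PySem.Str.endswith c ("_" ++ p))) (c0 :: cs) with
        | some c => rfl
        | none => simp [PySem.List.pyGet?, PySem.List.pyIdx?]
    rw [hA, pvLoopT_spec]
    have hlen : pvTests.length = 8 := by rfl
    set m := pvM (pvK pvTests) c0 cs with hm
    have hB : select_best_primary_key_column_py_alt (c0 :: cs) = some m := by
      simp [select_best_primary_key_column_py_alt, pvMinLoop_eq, hm]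
    by_cases hlt : pvK pvTests m < pvTests.length
    · rw [if_pos hlt, hB]
    · rw [if_neg hlt, hB]
      have hmem := pvM_mem (pvK pvTests) cs c0
      rw [← hm] at hmem
      have h8 : ∀ x ∈ c0 :: cs, pvK pvTests x = 8 := by
        intro x hx
        have h1 := pvM_le (pvK pvTests) cs c0 x hx
        have h2 := pvK_le pvTests x
        rw [← hm] at h1
        rw [hlen] at h2
        omega
      have : m = c0 := pvM_const 8 (pvK pvTests) cs c0 h8
      simp [this]
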